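-- pv_equiv track=rewrite | github.com/kintengg/VPROBE-monitoring-dashboard | backend/app/vehicle_store.py | _csv_fieldnames
-- ===== SOURCE A (Python) =====
-- from typing import Any, Optional, Union
--
-- def _csv_fieldnames(rows: list[dict[str, Any]], preferred: tuple[str, ...] = ()) -> list[str]:
--     fieldnames: list[str] = []
--     seen: set[str] = set()
--     for fieldname in preferred:
--         if fieldname not in seen:
--             fieldnames.append(fieldname)
--             seen.add(fieldname)
--     for row in rows:
--         for fieldname in row.keys():
--             if fieldname not in seen:
--                 fieldnames.append(fieldname)
--                 seen.add(fieldname)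
--     return fieldnames
-- ===== SOURCE B (Python) =====
-- def _csv_fieldnames(rows, preferred=()):
--     combined = list(preferred) + [k for row in rows for k in row]
--     return [x for i, x in enumerate(combined) if combined.index(x) == i]
-- ===== Notes on version B (the rewrite author's own statement) =====
-- stated objective: alternative
-- what changed: Instead of A's incremental accumulator with a seen-set membership branch, B builds the full combined key sequence once and keeps an element exactly when its position equals the list's first-occurrence index (combined.index(x) == i), trading the running state for a positional filter.
import Mathlib
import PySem

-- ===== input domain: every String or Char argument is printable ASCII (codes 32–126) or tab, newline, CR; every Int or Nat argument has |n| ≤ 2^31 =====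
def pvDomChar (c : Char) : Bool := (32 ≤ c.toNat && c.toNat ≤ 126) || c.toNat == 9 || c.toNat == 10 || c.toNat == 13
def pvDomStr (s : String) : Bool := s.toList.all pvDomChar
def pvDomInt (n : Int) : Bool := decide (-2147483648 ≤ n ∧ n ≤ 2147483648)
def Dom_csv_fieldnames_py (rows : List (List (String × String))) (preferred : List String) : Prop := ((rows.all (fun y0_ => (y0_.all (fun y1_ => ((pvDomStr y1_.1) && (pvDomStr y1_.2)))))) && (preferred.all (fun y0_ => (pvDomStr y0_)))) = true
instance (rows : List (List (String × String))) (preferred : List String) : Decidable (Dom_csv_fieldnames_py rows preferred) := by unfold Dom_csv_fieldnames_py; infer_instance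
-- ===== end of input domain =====

-- B replaces A's incremental accumulator + seen-set branch by a positional first-occurrence
-- filter over the combined key list (alternative decomposition; return value only).

-- ===== PORT A =====
-- A's loop body: append to fieldnames and add to seen when not already seen.
def pvStepA (st : List String × PySem.Set String) (f : String) : List String × PySem.Set String :=
  if PySem.Set.contains st.2 f then st else (st.1 ++ [f], PySem.Set.add st.2 f)

-- a row is a Python dict, so iterating it yields its keys: first occurrences, in order
def pvRowKeys (row : List (String × String)) : List String :=
  PySem.List.dedup (row.map Prod.fst)

def csv_fieldnames_py (rows : List (List (String × String))) (preferred : List String) : List String :=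
  let st1 := preferred.foldl pvStepA ([], PySem.Set.empty)
  let st2 := rows.foldl (fun st row => (pvRowKeys row).foldl pvStepA st) st1
  st2.1

-- ===== PORT B =====
def csv_fieldnames_py_alt (rows : List (List (String × String))) (preferred : List String) : List String :=
  let combined := preferred ++ rows.flatMap (fun row => pvRowKeys row)
  (PySem.List.enumerate combined 0).filterMap
    (fun p => if (PySem.List.index? combined p.2).map (fun n => (n : Int)) = some p.1 then some p.2 else none)

-- ===== PRECONDITION & SPEC =====
def Spec_csv_fieldnames_py (rows : List (List (String × String))) (preferred : List String) (out : List String) : Prop := out = csv_fieldnames_py_alt rows preferred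
instance (rows : List (List (String × String))) (preferred : List String) (out : List String) : Decidable (Spec_csv_fieldnames_py rows preferred out) := by unfold Spec_csv_fieldnames_py; infer_instance

-- ===== CLAIM (what is proved, stated in full; the proofs are below) =====
def Claim_equal_csv_fieldnames_py : Prop := ∀ (rows : List (List (String × String))) (preferred : List String), Dom_csv_fieldnames_py rows preferred → Spec_csv_fieldnames_py rows preferred (csv_fieldnames_py rows preferred)

-- ===== LEMMAS AND PROOFS =====

-- the elements of l that are new relative to an already-seen prefix s, in order
def pvNewElems (s : List String) : List String → List String
  | [] => []
  | a :: l => if a ∈ s then pvNewElems s l else a :: pvNewElems (s ++ [a]) l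

theorem pvNewElems_congr (s t : List String) (l : List String)
    (h : ∀ x, x ∈ s ↔ x ∈ t) : pvNewElems s l = pvNewElems t l := by
  induction l generalizing s t with
  | nil => rfl
  | cons a l ih =>
    simp only [pvNewElems]
    by_cases ha : a ∈ s
    · rw [if_pos ha, if_pos ((h a).1 ha)]; exact ih s t h
    · rw [if_neg ha, if_neg (fun hb => ha ((h a).2 hb))]
      exact congrArg (a :: ·) (ih (s ++ [a]) (t ++ [a]) (by intro x; simp [h x]))

-- A's loop keeps fieldnames = seen (as lists); one pass over xs is Set.update
theorem foldl_pvStepA (xs : List String) (s : PySem.Set String) :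
    xs.foldl pvStepA (s, s) = (PySem.Set.update s xs, PySem.Set.update s xs) := by
  induction xs generalizing s with
  | nil => simp [PySem.Set.update]
  | cons x xs ih =>
    rw [PySem.Set.update_cons]
    by_cases hx : x ∈ s
    · have : pvStepA (s, s) x = (s, s) := by
        simp [pvStepA]; exact hx
      rw [List.foldl_cons, this, ih, PySem.Set.add_of_mem hx]
    · have hc : PySem.Set.contains s x = false := by
        by_contra h
        exact hx ((PySem.Set.contains_iff s x).1 (by simpa using h))
      have : pvStepA (s, s) x = (PySem.Set.add s x, PySem.Set.add s x) := by
        simp [pvStepA, PySem.Set.add_of_not_mem hx]; exact hx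
      rw [List.foldl_cons, this, ih]

theorem foldl_rows (rows : List (List (String × String))) (s : PySem.Set String) :
    rows.foldl (fun st row => (pvRowKeys row).foldl pvStepA st) (s, s)
      = (PySem.Set.update s (rows.flatMap pvRowKeys), PySem.Set.update s (rows.flatMap pvRowKeys)) := by
  induction rows generalizing s with
  | nil => simp [PySem.Set.update]
  | cons r rs ih =>
    rw [List.foldl_cons, foldl_pvStepA, ih, List.flatMap_cons, PySem.Set.update_append]

-- A's accumulated set is the seen prefix followed by the new elements
theorem update_eq_append_newElems (l : List String) (s : List String) (hs : s.Nodup) :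
    PySem.Set.update s l = s ++ pvNewElems s l := by
  induction l generalizing s with
  | nil => simp [PySem.Set.update, pvNewElems]
  | cons a l ih =>
    rw [PySem.Set.update_cons, pvNewElems]
    by_cases ha : a ∈ s
    · rw [if_pos ha, PySem.Set.add_of_mem ha, ih s hs]
    · rw [if_neg ha, PySem.Set.add_of_not_mem ha, ih (s ++ [a]) (by simp [List.nodup_append, hs]; exact fun x hx he => ha (he ▸ hx))]
      simp

-- B's positional filter over a suffix l of c (with seen prefix pre) yields the new elements
theorem filter_enum_eq_newElems (c : List String) (l pre : List String) (hc : c = pre ++ l) :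
    (PySem.List.enumerate l (pre.length : Int)).filterMap
      (fun p => if (PySem.List.index? c p.2).map (fun n => (n : Int)) = some p.1 then some p.2 else none)
      = pvNewElems pre l := by
  induction l generalizing pre with
  | nil => rfl
  | cons a l ih =>
    rw [PySem.List.enumerate_cons, List.filterMap_cons, pvNewElems]
    by_cases ha : a ∈ pre
    · -- first occurrence of a is inside pre, strictly before pre.length: head dropped
      have hidx : PySem.List.index? c a = PySem.List.index? pre a := by
        rw [hc]; exact PySem.List.index?_append_of_mem _ ha
      obtain ⟨k, hk⟩ := Option.isSome_iff_exists.1 ((PySem.List.index?_isSome_iff pre a).2 ha)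
      have hklt : k < pre.length := by
        obtain ⟨pre', suf', heq, hlen, _⟩ := (PySem.List.index?_eq_some_iff pre a k).1 hk
        subst heq; simp [← hlen]
      have hcond : ¬ ((PySem.List.index? c a).map (fun n => (n : Int)) = some ((pre.length : Nat) : Int)) := by
        simp only [hidx, hk]
        intro h
        have : (k : Int) = (pre.length : Int) := by simpa using h
        omega
      rw [if_neg hcond, if_pos ha]
      have h2 := ih (pre ++ [a]) (by simpa using hc)
      rw [← pvNewElems_congr pre (pre ++ [a]) l (by intro x; simp; exact fun he => he ▸ ha)] at h2
      simpa using h2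
    · -- first occurrence of a is at pre.length: head kept
      have hidx : PySem.List.index? c a = some pre.length := by
        rw [hc]
        exact (PySem.List.index?_eq_some_iff _ a _).2 ⟨pre, l, rfl, rfl, ha⟩
      rw [if_neg ha]
      have h2 := ih (pre ++ [a]) (by simpa using hc)
      simp only [hidx]
      simpa using h2

-- ===== VERDICT (by name: the statement is the Claim_ definition above) =====
theorem csv_fieldnames_py_spec : Claim_equal_csv_fieldnames_py := by
  intro rows preferred _
  show csv_fieldnames_py rows preferred = csv_fieldnames_py_alt rows preferred
  unfold csv_fieldnames_py csv_fieldnames_py_alt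
  have h1 : preferred.foldl pvStepA ([], PySem.Set.empty)
      = (PySem.Set.update PySem.Set.empty preferred, PySem.Set.update PySem.Set.empty preferred) :=
    foldl_pvStepA preferred PySem.Set.empty
  simp only [h1, foldl_rows, ← PySem.Set.update_append]
  rw [update_eq_append_newElems _ PySem.Set.empty List.nodup_nil]
  have h3 := filter_enum_eq_newElems (preferred ++ rows.flatMap (fun row => pvRowKeys row))
      (preferred ++ rows.flatMap (fun row => pvRowKeys row)) [] rfl
  simp only [List.length_nil, Nat.cast_zero] at h3
  show ([] : List String) ++ pvNewElems [] _ = _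
  rw [List.nil_append]
  exact h3.symm
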